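-- pv_equiv track=rewrite | github.com/RAYFC/some_python_works | playfair_cipher/playfair.py | getthemessage
-- ===== SOURCE A (Python) =====
-- def getthemessage(msg):# chenge the forms of message
--     msg=msg.replace('X','KS')
--     #Replace X by KS
--     n=0
--     msg1=list(msg) #Chenge it into a list
--     while n<=len(msg1)-2:
--         if msg1[n]==msg1[n+1]:  #if the next character is the same as before
--             msg1.insert(n+1,'Q')
--         n+=2
--     if len(msg1)%2==1:          #if length of message is odd
--         msg1.append('Z')
--     return msg1
-- ===== SOURCE B (Python) =====
-- def getthemessage(msg):
--     # Single pass: emit two characters at a time, inserting the 'Q' pad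
--     # directly instead of mutating the list in place (O(n) vs O(n^2)).
--     msg = msg.replace('X', 'KS')
--     out = []
--     i = 0
--     n = len(msg)
--     while i < n - 1:
--         a, b = msg[i], msg[i + 1]
--         if a == b:
--             out.append(a)
--             out.append('Q')
--             i += 1
--         else:
--             out.append(a)
--             out.append(b)
--             i += 2
--     if i == n - 1:
--         out.append(msg[i])
--         out.append('Z')
--     return out
-- ===== Notes on version B (the rewrite author's own statement) =====
-- stated objective: faster
-- what changed: Replaces the in-place list.insert loop (each insert shifts the tail) by a single forward pass that emits characters two at a time and inserts the 'Q' pad and the final 'Z' directly into the output list.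
import Mathlib
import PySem

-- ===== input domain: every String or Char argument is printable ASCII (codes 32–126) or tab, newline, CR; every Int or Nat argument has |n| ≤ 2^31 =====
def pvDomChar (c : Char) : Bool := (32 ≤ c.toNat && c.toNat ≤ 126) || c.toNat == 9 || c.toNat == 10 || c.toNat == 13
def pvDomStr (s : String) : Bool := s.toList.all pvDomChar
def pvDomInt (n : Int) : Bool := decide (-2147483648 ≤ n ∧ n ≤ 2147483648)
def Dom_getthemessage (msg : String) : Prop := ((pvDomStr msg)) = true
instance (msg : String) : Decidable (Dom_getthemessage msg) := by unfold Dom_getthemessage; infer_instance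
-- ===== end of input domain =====

-- B replaces A's quadratic in-place insert loop by a single linear pass that emits the padded digraphs directly.

-- ===== PORT A =====
-- A's while loop: n advances by 2; list.insert(n+1,'Q') when msg1[n]==msg1[n+1].
-- Indices n, n+1 and insert position n+1 are always in range (n+2 ≤ length),
-- so List.insertIdx is exact for Python's list.insert here.
-- A's final odd-length check and append of 'Z':
def getthemessagePad (msg1 : List String) : List String :=
  if msg1.length % 2 = 1 then msg1 ++ ["Z"] else msg1

def getthemessageLoop (msg1 : List String) (n : Nat) : List String :=
  if _h : n + 2 ≤ msg1.length then
    if msg1.getD n "" = msg1.getD (n+1) "" then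
      getthemessageLoop (msg1.insertIdx (n+1) "Q") (n+2)
    else
      getthemessageLoop msg1 (n+2)
  else msg1
termination_by msg1.length - n
decreasing_by
  · simp only [List.length_insertIdx]; split <;> omega
  · omega

def getthemessage (msg : String) : List String :=
  getthemessagePad (getthemessageLoop ((PySem.Str.replace msg "X" "KS").toList.map (fun c => String.ofList [c])) 0)

-- ===== PORT B =====
-- B's single pass, two characters at a time; the trailing one-char case appends 'Z'.
def getthemessageAltLoop : List String → List String
  | [] => []
  | [a] => [a, "Z"]
  | a :: b :: rest =>
    if a = b then a :: "Q" :: getthemessageAltLoop (b :: rest)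
    else a :: b :: getthemessageAltLoop rest

def getthemessage_alt (msg : String) : List String :=
  getthemessageAltLoop ((PySem.Str.replace msg "X" "KS").toList.map (fun c => String.ofList [c]))

-- ===== PRECONDITION & SPEC =====
def Spec_getthemessage (msg : String) (out : List String) : Prop := out = getthemessage_alt msg
instance (msg : String) (out : List String) : Decidable (Spec_getthemessage msg out) := by unfold Spec_getthemessage; infer_instance

-- ===== CLAIM (what is proved, stated in full; the proofs are below) =====
def Claim_equal_getthemessage : Prop := ∀ (msg : String), Dom_getthemessage msg → Spec_getthemessage msg (getthemessage msg)

-- ===== LEMMAS AND PROOFS =====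

-- The 'core' of B's pass without the final 'Z' padding.
def bcore : List String → List String
  | [] => []
  | [a] => [a]
  | a :: b :: rest =>
    if a = b then a :: "Q" :: bcore (b :: rest)
    else a :: b :: bcore rest

theorem altLoop_eq_bcore_pad (l : List String) :
    getthemessageAltLoop l =
      bcore l ++ (if (bcore l).length % 2 = 1 then ["Z"] else []) := by
  fun_induction bcore l with
  | case1 => simp [getthemessageAltLoop]
  | case2 a => simp [getthemessageAltLoop]
  | case3 b rest ih =>
      simp only [getthemessageAltLoop]
      rw [ih]
      have h2 : ((bcore (b :: rest)).length + 1 + 1) % 2 = (bcore (b :: rest)).length % 2 := by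
        omega
      simp [h2]
  | case4 a b rest h ih =>
      simp only [getthemessageAltLoop, if_neg h]
      rw [ih]
      have h2 : ((bcore rest).length + 1 + 1) % 2 = (bcore rest).length % 2 := by omega
      simp [h2]

theorem insertIdx_append_length (pre l : List String) (v : String) :
    (pre ++ l).insertIdx pre.length v = pre ++ v :: l := by
  induction pre with
  | nil => simp [List.insertIdx]
  | cons x xs ih =>
      show x :: (xs ++ l).insertIdx xs.length v = x :: (xs ++ v :: l)
      rw [ih]

-- A's loop with processed prefix 'pre': it rewrites exactly the suffix, as bcore does.
theorem loop_eq_bcore (suf pre : List String) :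
    getthemessageLoop (pre ++ suf) pre.length = pre ++ bcore suf := by
  fun_induction bcore suf generalizing pre with
  | case1 =>
      rw [getthemessageLoop]
      simp
  | case2 a =>
      rw [getthemessageLoop]
      simp
  | case3 b rest ih =>
      rw [getthemessageLoop]
      have hlen : pre.length + 2 ≤ (pre ++ b :: b :: rest).length := by simp only [List.length_append, List.length_cons]; omega
      have hga : (pre ++ b :: b :: rest).getD pre.length "" = b := by
        simp [List.getD_eq_getElem?_getD]
      have hgb : (pre ++ b :: b :: rest).getD (pre.length + 1) "" = b := by
        rw [List.getD_eq_getElem?_getD]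
        simp
      rw [dif_pos hlen, hga, hgb, if_pos rfl]
      have hins : (pre ++ b :: b :: rest).insertIdx (pre.length + 1) "Q"
          = (pre ++ [b, "Q"]) ++ b :: rest := by
        have := insertIdx_append_length (pre ++ [b]) (b :: rest) "Q"
        simpa using this
      rw [hins]
      have hplen : pre.length + 2 = (pre ++ [b, "Q"]).length := by simp
      rw [hplen, ih (pre ++ [b, "Q"])]
      simp
  | case4 a b rest h ih =>
      rw [getthemessageLoop]
      have hlen : pre.length + 2 ≤ (pre ++ a :: b :: rest).length := by simp only [List.length_append, List.length_cons]; omega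
      have hga : (pre ++ a :: b :: rest).getD pre.length "" = a := by
        simp [List.getD_eq_getElem?_getD]
      have hgb : (pre ++ a :: b :: rest).getD (pre.length + 1) "" = b := by
        rw [List.getD_eq_getElem?_getD]
        simp
      rw [dif_pos hlen, hga, hgb, if_neg h]
      have hplen : pre.length + 2 = (pre ++ [a, b]).length := by simp
      have hsplit : pre ++ a :: b :: rest = (pre ++ [a, b]) ++ rest := by simp
      rw [hsplit, hplen, ih (pre ++ [a, b])]
      simp

-- ===== VERDICT (by name: the statement is the Claim_ definition above) =====
theorem getthemessage_spec : Claim_equal_getthemessage := by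
  intro msg _
  unfold Spec_getthemessage getthemessage getthemessage_alt getthemessagePad
  have h0 := loop_eq_bcore ((PySem.Str.replace msg "X" "KS").toList.map (fun c => String.ofList [c])) []
  simp only [List.nil_append, List.length_nil] at h0
  rw [h0, altLoop_eq_bcore_pad]
  split_ifs <;> simp_all
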